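-- pv_equiv track=rewrite | github.com/XUER1220/GameLLM-Benchmark | evaluator/dimension3/dimension3_code_quality.py | _effective_comment_lines
-- ===== SOURCE A (Python) =====
-- def _effective_comment_lines(source_lines: list[str]) -> int:
--     # 防“连续注释刷分”：每个连续注释块最多计 2 行。
--     count = 0
--     run = 0
--     for raw in source_lines:
--         stripped = raw.strip()
--         if stripped.startswith("#"):
--             run += 1
--             continue
--
--         if run > 0:
--             count += min(run, 2)
--             run = 0
--
--     if run > 0:
--         count += min(run, 2)
--     return count
-- ===== SOURCE B (Python) =====
-- def _effective_comment_lines(source_lines: list[str]) -> int: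
--     # Window formulation: a comment line counts iff the two lines before it
--     # are not both comments (i.e. it is among the first 2 lines of its block).
--     c = [line.strip().startswith("#") for line in source_lines]
--     return sum(1 for b, p1, p2 in zip(c, [False] + c, [False, False] + c)
--                if b and not (p1 and p2))
-- ===== Notes on version B (the rewrite author's own statement) =====
-- stated objective: simpler
-- what changed: Replaced the stateful running-counter loop with duplicated post-loop flush by a stateless sliding-window count: a comment line counts iff the two preceding lines are not both comments, summed via zip over shifted boolean lists.
import Mathlib
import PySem

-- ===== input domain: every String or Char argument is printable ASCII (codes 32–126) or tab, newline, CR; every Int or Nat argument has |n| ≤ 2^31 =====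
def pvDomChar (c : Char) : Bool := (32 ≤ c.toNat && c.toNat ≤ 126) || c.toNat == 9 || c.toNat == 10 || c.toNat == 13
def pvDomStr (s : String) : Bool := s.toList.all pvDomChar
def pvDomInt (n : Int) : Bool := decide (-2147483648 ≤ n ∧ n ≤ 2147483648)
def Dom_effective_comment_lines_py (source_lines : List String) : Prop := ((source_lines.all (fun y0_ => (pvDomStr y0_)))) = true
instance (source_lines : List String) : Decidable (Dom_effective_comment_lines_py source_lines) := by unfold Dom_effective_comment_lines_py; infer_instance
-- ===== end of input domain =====

-- B replaces A's running-counter loop + duplicated flush by a stateless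
-- sliding-window count over zipped shifted lists (objective: simpler).

-- ===== PORT A =====
-- literal transliteration of A's loop: state (count, run), flush after the loop
def effective_comment_lines_py (source_lines : List String) : Int :=
  let st := source_lines.foldl (fun (st : Int × Int) raw =>
    let stripped := PySem.Str.strip raw
    if PySem.Str.startswith stripped "#" then (st.1, st.2 + 1)
    else if st.2 > 0 then (st.1 + min st.2 2, 0) else st) (0, 0)
  if st.2 > 0 then st.1 + min st.2 2 else st.1

-- ===== PORT B =====
def effective_comment_lines_py_alt (source_lines : List String) : Int :=
  let c := source_lines.map (fun line => PySem.Str.startswith (PySem.Str.strip line) "#")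
  (((c.zip ((false :: c).zip (false :: false :: c))).filter
      (fun p => p.1 && !(p.2.1 && p.2.2))).length : Int)

-- ===== PRECONDITION & SPEC =====
def Spec_effective_comment_lines_py (source_lines : List String) (out : Int) : Prop := out = effective_comment_lines_py_alt source_lines
instance (source_lines : List String) (out : Int) : Decidable (Spec_effective_comment_lines_py source_lines out) := by unfold Spec_effective_comment_lines_py; infer_instance

-- ===== CLAIM (what is proved, stated in full; the proofs are below) =====
def Claim_equal_effective_comment_lines_py : Prop := ∀ (source_lines : List String), Dom_effective_comment_lines_py source_lines → Spec_effective_comment_lines_py source_lines (effective_comment_lines_py source_lines)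

-- ===== LEMMAS AND PROOFS =====

-- window count on a boolean list, carrying the previous two flags
def pvZc (p1 p2 : Bool) : List Bool → Int
  | [] => 0
  | b :: bs => (if b && !(p1 && p2) then (1 : Int) else 0) + pvZc b p1 bs

def pvStepA (st : Int × Int) (b : Bool) : Int × Int :=
  if b then (st.1, st.2 + 1)
  else if st.2 > 0 then (st.1 + min st.2 2, 0) else st

lemma pvZc_false (bs : List Bool) (p : Bool) : pvZc false p bs = pvZc false false bs := by
  cases bs <;> simp [pvZc]

lemma pvMain (bs : List Bool) : ∀ (count run : Int), 0 ≤ run →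
    (let st := bs.foldl pvStepA (count, run)
     if st.2 > 0 then st.1 + min st.2 2 else st.1)
      = count + min run 2 + pvZc (decide (1 ≤ run)) (decide (2 ≤ run)) bs := by
  induction bs with
  | nil =>
      intro count run h
      simp only [List.foldl_nil, pvZc]
      split_ifs with hr <;> omega
  | cons b bs ih =>
      intro count run h
      cases b with
      | true =>
          simp only [List.foldl_cons, pvStepA, if_true]
          rw [ih count (run + 1) (by omega)]
          have h1 : decide (1 ≤ run + 1) = true := by simp; omega
          have h2 : decide (2 ≤ run + 1) = decide (1 ≤ run) := by
            by_cases hx : 1 ≤ run <;> simp [hx] <;> omega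
          rw [h1, h2]
          simp only [pvZc]
          by_cases hx : 1 ≤ run <;> by_cases hy : 2 ≤ run <;>
            simp [hx, hy] <;> omega
      | false =>
          simp only [List.foldl_cons, pvStepA, if_false, Bool.false_eq_true]
          by_cases hr : run > 0
          · rw [if_pos hr, ih (count + min run 2) 0 (by omega)]
            simp only [pvZc]
            have h1 : decide (1 ≤ run) = true := by simp; omega
            rw [h1, pvZc_false]
            simp
          · rw [if_neg hr]
            have hz : run = 0 := by omega
            subst hz
            rw [ih count 0 (by omega)]
            simp [pvZc]

lemma pvZip (c : List Bool) : ∀ (p1 p2 : Bool),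
    (((c.zip ((p1 :: c).zip (p2 :: p1 :: c))).filter
        (fun p => p.1 && !(p.2.1 && p.2.2))).length : Int) = pvZc p1 p2 c := by
  induction c with
  | nil => intro p1 p2; simp [pvZc]
  | cons b c ih =>
      intro p1 p2
      rw [pvZc, ← ih b p1]
      simp only [List.zip_cons_cons, List.filter_cons]
      split_ifs with hx
      · simp_all
        omega
      · simp_all

-- ===== VERDICT (by name: the statement is the Claim_ definition above) =====
theorem effective_comment_lines_py_spec : Claim_equal_effective_comment_lines_py := by
  intro source_lines _
  unfold Spec_effective_comment_lines_py effective_comment_lines_py effective_comment_lines_py_alt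
  rw [show (fun (st : Int × Int) raw =>
      let stripped := PySem.Str.strip raw
      if PySem.Str.startswith stripped "#" then (st.1, st.2 + 1)
      else if st.2 > 0 then (st.1 + min st.2 2, 0) else st)
    = (fun st raw => pvStepA st (PySem.Str.startswith (PySem.Str.strip raw) "#")) from rfl]
  rw [← List.foldl_map (f := fun raw => PySem.Str.startswith (PySem.Str.strip raw) "#")]
  rw [pvMain _ 0 0 (by omega), pvZip]
  simp
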